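-- pv_equiv track=rewrite | github.com/RuslanBabudzhan/QuantumBearings | mlcsv.py | full_dicts_join
-- ===== SOURCE A (Python) =====
-- from typing import List
-- from collections import Counter
--
-- def full_dicts_join(dicts: List[dict]) -> dict:
--     joined_dict_keys = [list(d.keys()) for d in dicts]
--     joined_dict_keys = Counter([item for sublist in joined_dict_keys for item in sublist])
--     joined = dict([(key, []) for key in joined_dict_keys])
--     for d in dicts:
--         d_keys = list(d.keys())
--         for key in joined_dict_keys:
--             if key in d_keys:
--                 joined[key].append(d[key])
--             else:
--                 joined[key].append(None)
--
--     return joined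
-- ===== SOURCE B (Python) =====
-- def _scatter(pairs, n):
--     col = [None] * n
--     for i, v in pairs:
--         col[i] = v
--     return col
--
--
-- def full_dicts_join(dicts):
--     hits = {}
--     for i, d in enumerate(dicts):
--         for k, v in d.items():
--             hits.setdefault(k, []).append((i, v))
--     n = len(dicts)
--     return {k: _scatter(pairs, n) for k, pairs in hits.items()}
-- ===== Notes on version B (the rewrite author's own statement) =====
-- stated objective: faster
-- what changed: Replaces A's precomputed key Counter and row-wise lockstep appends (every key visited for every dict, with an O(k) 'key in d_keys' list scan per cell) by a single sparse pass that records (index, value) hits per key via setdefault, followed by scattering each key's hits into a preallocated [None]*n column.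
import Mathlib
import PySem

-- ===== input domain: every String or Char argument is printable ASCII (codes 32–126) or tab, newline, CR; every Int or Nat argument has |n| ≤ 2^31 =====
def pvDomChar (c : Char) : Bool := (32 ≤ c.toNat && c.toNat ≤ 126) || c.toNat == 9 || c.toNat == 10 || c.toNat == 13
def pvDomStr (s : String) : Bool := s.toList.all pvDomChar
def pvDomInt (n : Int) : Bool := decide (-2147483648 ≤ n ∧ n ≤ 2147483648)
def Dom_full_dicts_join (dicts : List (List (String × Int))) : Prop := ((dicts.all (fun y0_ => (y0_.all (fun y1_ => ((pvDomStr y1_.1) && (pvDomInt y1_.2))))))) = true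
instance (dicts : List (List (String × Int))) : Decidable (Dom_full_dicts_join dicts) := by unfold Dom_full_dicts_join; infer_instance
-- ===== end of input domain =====

-- B replaces A's Counter-key lockstep appends by one sparse pass recording (index, value)
-- hits per key, then scattering each key's hits into a preallocated None column (faster: no
-- per-cell key-membership scan).  Python A mutates nothing observable; return values only.


-- ===== PORT A =====
-- Each inner association list is the Python dict argument: decode it with Dict.ofList
-- (Python's dict(pairs): later duplicate keys overwrite in place), identically in both ports.
def pvDs (dicts : List (List (String × Int))) : List (PySem.Dict String Int) :=
  dicts.map (fun l => PySem.Dict.ofList l)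

-- joined_dict_keys = Counter([item for sublist in [list(d.keys()) for d in dicts] for item in sublist])
def pvCnt (dicts : List (List (String × Int))) : PySem.Dict String Int :=
  PySem.Dict.counter ((pvDs dicts).map (fun d => d.keys)).flatten

def full_dicts_join (dicts : List (List (String × Int))) : List (String × List (Option Int)) :=
  -- joined = dict([(key, []) for key in joined_dict_keys]); then
  -- for d in dicts: for key in joined_dict_keys: if key in d_keys: joined[key].append(d[key]) else append(None)
  (List.foldl (fun j d =>
      List.foldl (fun j key =>
          if d.keys.contains key then
            -- joined[key].append(d[key]); d[key] exists here, so getD's default is never used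
            j.modify key [] (fun l => l ++ [some (d.getD key 0)])
          else
            j.modify key [] (fun l => l ++ [none]))
        j (pvCnt dicts).keys)
    (PySem.Dict.ofList ((pvCnt dicts).keys.map (fun k => (k, ([] : List (Option Int))))))
    (pvDs dicts)).items

-- ===== PORT B =====
-- col = [None] * n; for i, v in pairs: col[i] = v
-- (every index i comes from enumerate, so 0 ≤ i < n: List.set at i.toNat is exact here)
def pvScatter (pairs : List (Int × Int)) (n : Nat) : List (Option Int) :=
  pairs.foldl (fun col p => col.set p.1.toNat (some p.2)) (List.replicate n none)

-- hits = {}; for i, d in enumerate(dicts): for k, v in d.items(): hits.setdefault(k, []).append((i, v))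
def pvHits (dicts : List (List (String × Int))) : PySem.Dict String (List (Int × Int)) :=
  (PySem.List.enumerate (dicts.map (fun l => PySem.Dict.ofList l))).foldl
    (fun h p => p.2.items.foldl (fun h q => h.modify q.1 [] (fun l => l ++ [(p.1, q.2)])) h)
    PySem.Dict.empty

def full_dicts_join_alt (dicts : List (List (String × Int))) : List (String × List (Option Int)) :=
  -- return {k: _scatter(pairs, n) for k, pairs in hits.items()}
  (pvHits dicts).items.map (fun kp => (kp.1, pvScatter kp.2 dicts.length))

-- ===== PRECONDITION & SPEC =====
def Spec_full_dicts_join (dicts : List (List (String × Int))) (out : List (String × List (Option Int))) : Prop := out = full_dicts_join_alt dicts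
instance (dicts : List (List (String × Int))) (out : List (String × List (Option Int))) : Decidable (Spec_full_dicts_join dicts out) := by unfold Spec_full_dicts_join; infer_instance

-- ===== CLAIM (what is proved, stated in full; the proofs are below) =====
def Claim_equal_full_dicts_join : Prop := ∀ (dicts : List (List (String × Int))), Dom_full_dicts_join dicts → Spec_full_dicts_join dicts (full_dicts_join dicts)

-- ===== LEMMAS AND PROOFS =====

-- The value A appends for dict d at key c (the if/else collapsed to the appended element).
def pvCol (d : PySem.Dict String Int) (c : String) : Option Int :=
  if d.keys.contains c then some (d.getD c 0) else none

theorem pvCol_eq_get? (d : PySem.Dict String Int) (c : String) :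
    pvCol d c = d.get? c := by
  unfold pvCol
  rcases h : d.get? c with _ | v
  · have hc : d.contains c = false := by
      rw [PySem.Dict.contains_eq_isSome_get?, h]; rfl
    have hnk : c ∉ d.keys := fun hm => by
      rw [← PySem.Dict.contains_iff_mem_keys] at hm
      simp [hm] at hc
    simp [hnk]
  · have hc : d.contains c = true := by
      rw [PySem.Dict.contains_eq_isSome_get?, h]; rfl
    have hmem : c ∈ d.keys := (PySem.Dict.contains_iff_mem_keys d c).mp hc
    simp [hmem, PySem.Dict.getD_of_get?_eq_some d 0 h]

theorem pvStep_eq (d : PySem.Dict String Int) (j : PySem.Dict String (List (Option Int))) (key : String) :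
    (if d.keys.contains key then
        j.modify key [] (fun l => l ++ [some (d.getD key 0)])
      else
        j.modify key [] (fun l => l ++ [none]))
    = j.modify key [] (fun l => l ++ [pvCol d key]) := by
  unfold pvCol; split <;> rfl

-- inner loop: value at c after folding the modifies over a Nodup key list L
theorem pvInner_getD (d : PySem.Dict String Int) (L : List String) (hL : L.Nodup)
    (j : PySem.Dict String (List (Option Int))) (c : String) :
    (L.foldl (fun j key => j.modify key [] (fun l => l ++ [pvCol d key])) j).getD c []
    = if c ∈ L then j.getD c [] ++ [pvCol d c] else j.getD c [] := by
  induction L generalizing j with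
  | nil => simp
  | cons key L ih =>
    rcases List.nodup_cons.mp hL with ⟨hk, hL'⟩
    simp only [List.foldl_cons, ih hL']
    by_cases hc : c ∈ L
    · have hne : c ≠ key := fun h => hk (h ▸ hc)
      simp [hc, hne, PySem.Dict.getD_modify]
    · by_cases hck : c = key
      · subst hck
        simp [hc]
      · simp [hc, hck, PySem.Dict.getD_modify]

theorem pvInner_keys (d : PySem.Dict String Int) (L : List String)
    (j : PySem.Dict String (List (Option Int))) (hsub : ∀ x ∈ L, x ∈ j.keys) :
    (L.foldl (fun j key => j.modify key [] (fun l => l ++ [pvCol d key])) j).keys = j.keys := by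
  rw [PySem.Dict.keys_foldl_modify L [] (fun _ key => (fun l => l ++ [pvCol d key])) j]
  rw [PySem.Set.update_eq_append_filter]
  have : (PySem.Set.ofList L).filter (fun y => !(PySem.Set.contains j.keys y)) = [] := by
    apply List.filter_eq_nil_iff.mpr
    intro x hx
    have hxL : x ∈ L := (PySem.List.mem_dedup L x).mp (by rw [PySem.List.dedup_eq_ofList]; exact hx)
    simp [PySem.Set.contains_eq_listContains, hsub x hxL]
  rw [this, List.append_nil]

-- outer loop over the dicts, with fixed Nodup key list K and starting dict with keys K
theorem pvOuter (K : List String) (hK : K.Nodup) (ds : List (PySem.Dict String Int))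
    (j : PySem.Dict String (List (Option Int))) (hkeys : j.keys = K) :
    (ds.foldl (fun j d =>
        K.foldl (fun j key => j.modify key [] (fun l => l ++ [pvCol d key])) j) j).keys = K
    ∧ ∀ c ∈ K,
      (ds.foldl (fun j d =>
        K.foldl (fun j key => j.modify key [] (fun l => l ++ [pvCol d key])) j) j).getD c []
      = j.getD c [] ++ ds.map (fun d => pvCol d c) := by
  induction ds generalizing j with
  | nil => simp [hkeys]
  | cons d ds ih =>
    have hsub : ∀ x ∈ K, x ∈ j.keys := fun x hx => hkeys ▸ hx
    have hkeys' : (K.foldl (fun j key => j.modify key [] (fun l => l ++ [pvCol d key])) j).keys = K := by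
      rw [pvInner_keys d K j hsub, hkeys]
    rcases ih _ hkeys' with ⟨h1, h2⟩
    refine ⟨h1, fun c hc => ?_⟩
    simp only [List.foldl_cons]
    rw [h2 c hc, pvInner_getD d K hK j c]
    simp [hc]

theorem pvJoined0_items (K : List String) (hK : K.Nodup) :
    (PySem.Dict.ofList (K.map (fun k => (k, ([] : List (Option Int)))))).items
    = K.map (fun k => (k, ([] : List (Option Int)))) := by
  show (PySem.Dict.empty.update (K.map (fun k => (k, ([] : List (Option Int)))))).items = _
  unfold PySem.Dict.update
  rw [List.foldl_map]
  rw [PySem.Dict.items_foldl_insert_fresh K (fun k => k) (fun _ => ([] : List (Option Int)))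
      PySem.Dict.empty (fun a _ => by simp [PySem.Dict.contains_empty]) (by simpa using hK)]
  simp [PySem.Dict.empty]

theorem pvJoined0_keys (K : List String) (hK : K.Nodup) :
    (PySem.Dict.ofList (K.map (fun k => (k, ([] : List (Option Int)))))).keys = K := by
  have := pvJoined0_items K hK
  unfold PySem.Dict.keys
  rw [this, List.map_map,
    show ((fun p : String × List (Option Int) => p.1) ∘ fun k => (k, ([] : List (Option Int)))) = id from rfl,
    List.map_id]

theorem pvJoined0_getD (K : List String) (hK : K.Nodup) (c : String) :
    (PySem.Dict.ofList (K.map (fun k => (k, ([] : List (Option Int)))))).getD c [] = [] := by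
  rcases h : (PySem.Dict.ofList (K.map (fun k => (k, ([] : List (Option Int)))))).get? c with _ | v
  · exact PySem.Dict.getD_of_get?_eq_none _ _ h
  · have hm := PySem.Dict.mem_items_of_get?_eq_some _ h
    rw [pvJoined0_items K hK] at hm
    rcases List.mem_map.mp hm with ⟨k, _, hkv⟩
    injection hkv with h1 h2
    rw [PySem.Dict.getD_of_get?_eq_some _ [] h]
    exact h2.symm

-- A's full result, characterised.
theorem pvA_eq (dicts : List (List (String × Int))) :
    full_dicts_join dicts
    = (PySem.Set.ofList ((pvDs dicts).map (fun d => d.keys)).flatten).map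
        (fun k => (k, (pvDs dicts).map (fun d => d.get? k))) := by
  unfold full_dicts_join pvCnt
  set ds := pvDs dicts with hds
  set flat := (ds.map (fun d => d.keys)).flatten with hflat
  set K := PySem.Set.ofList flat with hKdef
  have hK : K.Nodup := PySem.Set.nodup_ofList flat
  have hcntK : (PySem.Dict.counter flat).keys = K := PySem.Dict.keys_counter flat
  rw [hcntK]
  have hstep : ∀ (j : PySem.Dict String (List (Option Int))) (d : PySem.Dict String Int),
      (List.foldl (fun j key =>
        if d.keys.contains key then
          j.modify key [] (fun l => l ++ [some (d.getD key 0)])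
        else
          j.modify key [] (fun l => l ++ [none])) j K)
      = List.foldl (fun j key => j.modify key [] (fun l => l ++ [pvCol d key])) j K := by
    intro j d
    exact PySem.List.foldl_congr_mem K _ _ j (fun acc key _ => pvStep_eq d acc key)
  have hfold :
      (List.foldl (fun j d =>
        List.foldl (fun j key =>
          if d.keys.contains key then
            j.modify key [] (fun l => l ++ [some (d.getD key 0)])
          else
            j.modify key [] (fun l => l ++ [none])) j K)
        (PySem.Dict.ofList (K.map (fun k => (k, ([] : List (Option Int)))))) ds)
      = (List.foldl (fun j d =>
        List.foldl (fun j key => j.modify key [] (fun l => l ++ [pvCol d key])) j K)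
        (PySem.Dict.ofList (K.map (fun k => (k, ([] : List (Option Int)))))) ds) :=
    PySem.List.foldl_congr_mem ds _ _ _ (fun acc d _ => hstep acc d)
  rw [hfold]
  rcases pvOuter K hK ds _ (pvJoined0_keys K hK) with ⟨h1, h2⟩
  rw [PySem.Dict.items_eq_map_keys _ (by rw [h1]; exact hK) [], h1]
  apply List.map_congr_left
  intro k hk
  rw [h2 k hk, pvJoined0_getD K hK k]
  simp only [List.nil_append]
  congr 1
  apply List.map_congr_left
  intro d _
  exact pvCol_eq_get? d k

-- ---- B side ----

-- Specification of the hits column for key k: (index, value) for each dict containing k.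
def pvPairs (k : String) (ds : List (PySem.Dict String Int)) (s : Nat) : List (Int × Int) :=
  match ds with
  | [] => []
  | d :: ds =>
    (match d.get? k with
     | some v => [((s : Int), v)]
     | none => []) ++ pvPairs k ds (s + 1)

-- lookup in an association list with distinct keys, as a filter
theorem pvFilterLookup (l : List (String × Int)) (hnd : (l.map Prod.fst).Nodup) (k : String) :
    l.filter (fun q => q.1 == k)
    = (match (PySem.Dict.mk l).get? k with
       | some v => [(k, v)]
       | none => []) := by
  induction l with
  | nil => rfl
  | cons a rest ih =>
    have hnd' := hnd
    rw [List.map_cons] at hnd'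
    rcases List.nodup_cons.mp hnd' with ⟨ha, hrest⟩
    rw [PySem.Dict.get?_mk_cons]
    by_cases hk : a.1 = k
    · subst hk
      have hnil : rest.filter (fun q => q.1 == a.1) = [] := by
        apply List.filter_eq_nil_iff.mpr
        intro q hq
        simp only [beq_iff_eq]
        intro hqk
        exact ha (hqk ▸ List.mem_map_of_mem hq)
      simp [hnil]
    · have hne : (a.1 == k) = false := by simpa using hk
      simp [hne, ih hrest]

-- the per-dict inner append, filtered at key k, for a dict with Nodup keys
theorem pvItemsFilter (d : PySem.Dict String Int) (hnd : d.keys.Nodup) (k : String) (i : Int) :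
    ((d.items.filter (fun q => q.1 == k)).map (fun q => ((i, q.2) : Int × Int)))
    = (match d.get? k with
       | some v => [((i : Int), v)]
       | none => []) := by
  have hit : PySem.Dict.mk d.items = d := rfl
  rw [pvFilterLookup d.items (by simpa [PySem.Dict.keys] using hnd) k, hit]
  rcases d.get? k with _ | v <;> rfl

-- inner per-dict fold of B, via getD_foldl_modify_append
theorem pvHitsInner (d : PySem.Dict String Int) (hnd : d.keys.Nodup) (i : Int)
    (h : PySem.Dict String (List (Int × Int))) (k : String) :
    (d.items.foldl (fun h q => h.modify q.1 [] (fun l => l ++ [(i, q.2)])) h).getD k []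
    = h.getD k [] ++ (match d.get? k with
       | some v => [((i : Int), v)]
       | none => []) := by
  have hmap : d.items.foldl (fun h q => h.modify q.1 [] (fun l => l ++ [(i, q.2)])) h
      = (d.items.map (fun q => (q.1, ((i, q.2) : Int × Int)))).foldl
          (fun h p => h.modify p.1 [] (fun l => l ++ [p.2])) h := by
    rw [List.foldl_map]
  rw [hmap, PySem.Dict.getD_foldl_modify_append]
  congr 1
  rw [← pvItemsFilter d hnd k i]
  have hfil : (d.items.map (fun q => (q.1, ((i, q.2) : Int × Int)))).filter (fun p => p.1 == k)
      = (d.items.filter (fun q => q.1 == k)).map (fun q => (q.1, ((i, q.2) : Int × Int))) := by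
    rw [List.filter_map]
    rfl
  rw [hfil, List.map_map]
  rfl

-- outer fold of B: getD at k accumulates pvPairs
theorem pvHitsOuter (ds : List (PySem.Dict String Int)) (hnd : ∀ d ∈ ds, d.keys.Nodup)
    (s : Nat) (h : PySem.Dict String (List (Int × Int))) (k : String) :
    ((PySem.List.enumerate ds (s : Int)).foldl
      (fun h p => p.2.items.foldl (fun h q => h.modify q.1 [] (fun l => l ++ [(p.1, q.2)])) h) h).getD k []
    = h.getD k [] ++ pvPairs k ds s := by
  induction ds generalizing s h with
  | nil => simp [pvPairs, PySem.List.enumerate_nil]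
  | cons d ds ih =>
    rw [PySem.List.enumerate_cons]
    simp only [List.foldl_cons]
    have hs : ((s : Int) + 1) = ((s + 1 : Nat) : Int) := by push_cast; ring
    rw [hs, ih (fun d hd => hnd d (List.mem_cons_of_mem _ hd)) (s + 1)]
    rw [pvHitsInner d (hnd d (List.mem_cons_self ..)) (s : Int) h k]
    rw [pvPairs, List.append_assoc]

-- keys of B's hits dict = ordered key set K
theorem pvHitsKeys (ds : List (PySem.Dict String Int)) (s : Int)
    (h : PySem.Dict String (List (Int × Int))) :
    ((PySem.List.enumerate ds s).foldl
      (fun h p => p.2.items.foldl (fun h q => h.modify q.1 [] (fun l => l ++ [(p.1, q.2)])) h) h).keys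
    = PySem.Set.update h.keys (ds.map (fun d => d.keys)).flatten := by
  induction ds generalizing s h with
  | nil => simp [PySem.List.enumerate_nil, PySem.Set.update]
  | cons d ds ih =>
    rw [PySem.List.enumerate_cons]
    simp only [List.foldl_cons]
    rw [ih]
    have hinner : (d.items.foldl (fun h q => h.modify q.1 [] (fun l => l ++ [(s, q.2)])) h).keys
        = PySem.Set.update h.keys d.keys := by
      rw [PySem.Dict.keys_foldl_modify_key d.items (fun q => q.1) [] (fun _ q => (fun l => l ++ [(s, q.2)])) h]
      rfl
    rw [hinner]
    simp only [List.map_cons, List.flatten_cons]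
    rw [show PySem.Set.update h.keys (d.keys ++ (ds.map (fun d => d.keys)).flatten)
        = PySem.Set.update (PySem.Set.update h.keys d.keys) (ds.map (fun d => d.keys)).flatten from by
      unfold PySem.Set.update; rw [List.foldl_append]]

-- scatter: writing pvPairs into a fresh None block yields the column of get?s
theorem pvScatter_eq (k : String) (ds : List (PySem.Dict String Int)) (c0 : List (Option Int)) :
    (pvPairs k ds c0.length).foldl (fun col p => col.set p.1.toNat (some p.2))
      (c0 ++ List.replicate ds.length none)
    = c0 ++ ds.map (fun d => d.get? k) := by
  induction ds generalizing c0 with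
  | nil => simp [pvPairs]
  | cons d ds ih =>
    rw [pvPairs]
    have hrep : List.replicate (d :: ds).length (none : Option Int)
        = [none] ++ List.replicate ds.length none := by simp [List.replicate_succ]
    rw [hrep, ← List.append_assoc]
    rcases hg : d.get? k with _ | v
    · simp only [List.nil_append]
      have := ih (c0 ++ [(none : Option Int)])
      rw [List.length_append, List.length_cons, List.length_nil] at this
      rw [this]
      simp [hg, List.append_assoc]
    · simp only [List.singleton_append, List.foldl_cons]
      have hsetv : ((c0 ++ [(none : Option Int)]) ++ List.replicate ds.length none).set ((c0.length : Int)).toNat (some v)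
          = (c0 ++ [some v]) ++ List.replicate ds.length none := by
        rw [Int.toNat_natCast]
        rw [List.append_assoc, List.append_assoc, List.set_append_right _ _ (Nat.le_refl _)]
        simp
      rw [hsetv]
      have := ih (c0 ++ [some v])
      rw [List.length_append, List.length_cons, List.length_nil] at this
      rw [this]
      simp [hg, List.append_assoc]

-- ===== VERDICT (by name: the statement is the Claim_ definition above) =====
theorem full_dicts_join_spec : Claim_equal_full_dicts_join := by
  intro dicts _
  unfold Spec_full_dicts_join
  rw [pvA_eq]
  unfold full_dicts_join_alt pvHits
  set ds := dicts.map (fun l => PySem.Dict.ofList l) with hds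
  have hds' : pvDs dicts = ds := rfl
  rw [hds']
  set flat := (ds.map (fun d => d.keys)).flatten with hflat
  set K := PySem.Set.ofList flat with hKdef
  have hK : K.Nodup := PySem.Set.nodup_ofList flat
  have hnd : ∀ d ∈ ds, d.keys.Nodup := by
    intro d hd
    rcases List.mem_map.mp hd with ⟨l, _, hl⟩
    exact hl ▸ PySem.Dict.nodup_keys_ofList l
  have hkeys : ((PySem.List.enumerate ds (0 : Int)).foldl
      (fun h p => p.2.items.foldl (fun h q => h.modify q.1 [] (fun l => l ++ [(p.1, q.2)])) h)
      PySem.Dict.empty).keys = K := by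
    rw [pvHitsKeys ds 0 PySem.Dict.empty]
    rw [show PySem.Dict.empty.keys = ([] : List String) from rfl]
    rfl
  have hgetD : ∀ k, ((PySem.List.enumerate ds (0 : Int)).foldl
      (fun h p => p.2.items.foldl (fun h q => h.modify q.1 [] (fun l => l ++ [(p.1, q.2)])) h)
      PySem.Dict.empty).getD k [] = pvPairs k ds 0 := by
    intro k
    have := pvHitsOuter ds hnd 0 PySem.Dict.empty k
    simpa using this
  rw [PySem.Dict.items_eq_map_keys _ (by rw [hkeys]; exact hK) []]
  rw [hkeys, List.map_map]
  apply List.map_congr_left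
  intro k hk
  simp only [Function.comp]
  rw [hgetD k]
  congr 1
  have hlen : dicts.length = ds.length := by rw [hds]; simp
  have := pvScatter_eq k ds ([] : List (Option Int))
  simp only [List.length_nil, List.nil_append] at this
  rw [hlen]
  exact this.symm
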